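-- pv_equiv track=rewrite | github.com/ivanesterenkko/roof_back | app/projects/slope.py | get_next_name
-- ===== SOURCE A (Python) =====
-- from itertools import product
-- from typing import List
--
-- def get_next_name(existing_names: List[str]) -> str:
--     """Генерирует следующее имя для линии в формате Excel-стиля."""
--     alphabet = 'ABCDEFGHIJKLMNOPQRSTUVWXYZ'
--
--     def generate_names():
--         for length in range(1, 3):
--             for letters in product(alphabet, repeat=length):
--                 yield ''.join(letters)
--
--     name_generator = generate_names()
--
--     for name in name_generator:
--         if name not in existing_names:
--             return name
-- ===== SOURCE B (Python) =====
-- def get_next_name(existing_names):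
--     """Генерирует следующее имя для линии в формате Excel-стиля."""
--     for i in range(1, 703):
--         n = i
--         name = ''
--         while n > 0:
--             n, rem = divmod(n - 1, 26)
--             name = chr(65 + rem) + name
--         if name not in existing_names:
--             return name
-- ===== Notes on version B (the rewrite author's own statement) =====
-- stated objective: idiomatic
-- what changed: Replaces the itertools.product generator over lengths 1-2 with bijective base-26 arithmetic: for i in 1..702 the Excel column name is built by repeated divmod, returning the first one not in existing_names.
import Mathlib
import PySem

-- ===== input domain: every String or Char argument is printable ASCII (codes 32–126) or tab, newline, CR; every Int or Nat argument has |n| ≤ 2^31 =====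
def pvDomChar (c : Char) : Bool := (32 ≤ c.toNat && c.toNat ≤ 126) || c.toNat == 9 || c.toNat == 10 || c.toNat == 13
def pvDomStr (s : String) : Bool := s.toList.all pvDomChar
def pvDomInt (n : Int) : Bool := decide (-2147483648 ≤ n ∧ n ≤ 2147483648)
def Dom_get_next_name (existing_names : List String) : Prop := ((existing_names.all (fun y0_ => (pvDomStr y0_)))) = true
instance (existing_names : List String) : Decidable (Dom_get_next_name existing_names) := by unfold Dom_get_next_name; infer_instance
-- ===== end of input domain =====

-- B generates the Excel-style names by bijective base-26 arithmetic (divmod) instead of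
-- itertools.product over lengths 1..2; idiomatic, same cost.

-- ===== PORT A =====
-- alphabet = 'ABCDEFGHIJKLMNOPQRSTUVWXYZ'
def pvAlphabet : List Char := ("ABCDEFGHIJKLMNOPQRSTUVWXYZ").toList

-- generate_names(): length 1 names, then all length-2 products, in generator order
def pvNamesA : List String :=
  (pvAlphabet.map fun c => String.mk [c]) ++
  (pvAlphabet.flatMap fun a => pvAlphabet.map fun b => String.mk [a, b])

-- the for-loop over the generator: first name not in existing_names
-- (the [] case is Python A falling through and returning None; excluded by Pre_)
def pvFindNotIn : List String → List String → String
  | [], _ => ""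
  | n :: rest, ex => if ex.contains n then pvFindNotIn rest ex else n

def get_next_name (existing_names : List String) : String :=
  pvFindNotIn pvNamesA existing_names

-- ===== PORT B =====
-- the while loop 'while n > 0: n, rem = divmod(n-1, 26); name = chr(65+rem) + name',
-- with fuel = initial n to make the recursion structural (n strictly decreases in Python)
def pvColNameAux : Nat → Nat → String
  | 0, _ => ""
  | _ + 1, 0 => ""
  | fuel + 1, m + 1 => pvColNameAux fuel (m / 26) ++ String.mk [Char.ofNat (65 + m % 26)]

def pvColName (i : Nat) : String := pvColNameAux i i

-- for i in range(1, 703): build name; return it if not in existing_names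
-- (the [] case is Python B falling through and returning None; excluded by Pre_)
def pvFindBAux (ex : List String) : List Nat → String
  | [] => ""
  | i :: rest =>
      let name := pvColName i
      if ex.contains name then pvFindBAux ex rest else name

def get_next_name_alt (existing_names : List String) : String :=
  pvFindBAux existing_names (List.range' 1 702)

-- ===== PRECONDITION & SPEC =====
-- the 702 candidate names "A".."Z","AA".."ZZ", defined independently of both ports
def pvPreNames : List String :=
  ((List.range 26).map fun k => String.mk [Char.ofNat (65 + k)]) ++
  ((List.range 26).flatMap fun a => (List.range 26).map fun b =>
    String.mk [Char.ofNat (65 + a), Char.ofNat (65 + b)])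

-- Pre_ excludes lists that contain all 702 candidate names: there Python A (and B)
-- falls off the loop and returns None, which is not a str.
def Pre_get_next_name (existing_names : List String) : Prop :=
  ∃ s ∈ pvPreNames, ¬ existing_names.contains s
instance (existing_names : List String) : Decidable (Pre_get_next_name existing_names) := by
  unfold Pre_get_next_name; infer_instance

def pvWitness_get_next_name : List String := ["A", "B"]

def Spec_get_next_name (existing_names : List String) (out : String) : Prop :=
  out = get_next_name_alt existing_names
instance (existing_names : List String) (out : String) : Decidable (Spec_get_next_name existing_names out) := by
  unfold Spec_get_next_name; infer_instance

-- ===== CLAIM (what is proved, stated in full; the proofs are below) =====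
def Claim_equal_get_next_name : Prop := ∀ (existing_names : List String), Dom_get_next_name existing_names → Pre_get_next_name existing_names → Spec_get_next_name existing_names (get_next_name existing_names)

-- ===== LEMMAS AND PROOFS =====
-- B's scan over indices equals A's scan over the corresponding names
theorem pvFindB_eq_findA (ex : List String) (l : List Nat) :
    pvFindBAux ex l = pvFindNotIn (l.map pvColName) ex := by
  induction l with
  | nil => rfl
  | cons i rest ih => simp [pvFindBAux, pvFindNotIn, ih]

-- the 702 names B generates are exactly A's generator output, in order
theorem pvColNames_eq : (List.range' 1 702).map pvColName = pvNamesA := by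
  set_option maxRecDepth 10000 in decide

-- ===== VERDICT (by name: the statement is the Claim_ definition above) =====
theorem get_next_name_spec : Claim_equal_get_next_name := by
  intro ex _ _
  show get_next_name ex = get_next_name_alt ex
  rw [get_next_name, get_next_name_alt, pvFindB_eq_findA, pvColNames_eq]
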